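-- pv_equiv track=rewrite | github.com/Jakkapan-a/Hackathon | src/llm_parser.py | _dedupe_statements
-- ===== SOURCE A (Python) =====
-- from typing import List, Dict, Any, Optional
--
-- def _dedupe_statements(statements: List[Dict]) -> List[Dict]:
--     """Remove duplicate statements, keeping the one with most data"""
--     by_type = {}
--     for stmt in statements:
--         type_id = stmt.get("statement_type_id")
--         if type_id not in by_type:
--             by_type[type_id] = stmt
--         else:
--             # Keep the one with more non-null values
--             existing = by_type[type_id]
--             existing_count = sum(1 for v in existing.values() if v is not None)
--             new_count = sum(1 for v in stmt.values() if v is not None)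
--             if new_count > existing_count:
--                 by_type[type_id] = stmt
--     return list(by_type.values())
-- ===== SOURCE B (Python) =====
-- from typing import List, Dict, Any, Optional
--
-- def _dedupe_statements(statements: List[Dict]) -> List[Dict]:
--     """Remove duplicate statements, keeping the one with most data.
--
--     Two passes: first group the statements by type (insertion order),
--     then pick from each group the first statement with the most non-null values.
--     """
--     buckets = {}
--     for stmt in statements:
--         buckets.setdefault(stmt.get("statement_type_id"), []).append(stmt)
--     return [max(group, key=lambda s: sum(1 for v in s.values() if v is not None))
--             for group in buckets.values()]
-- ===== Notes on version B (the rewrite author's own statement) =====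
-- stated objective: alternative
-- what changed: Replaces the single pass that keeps a running best statement per type with two passes: a grouping pass building full per-type buckets, then a selection pass taking max(group, key=non-null count) from each bucket.
import Mathlib
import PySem

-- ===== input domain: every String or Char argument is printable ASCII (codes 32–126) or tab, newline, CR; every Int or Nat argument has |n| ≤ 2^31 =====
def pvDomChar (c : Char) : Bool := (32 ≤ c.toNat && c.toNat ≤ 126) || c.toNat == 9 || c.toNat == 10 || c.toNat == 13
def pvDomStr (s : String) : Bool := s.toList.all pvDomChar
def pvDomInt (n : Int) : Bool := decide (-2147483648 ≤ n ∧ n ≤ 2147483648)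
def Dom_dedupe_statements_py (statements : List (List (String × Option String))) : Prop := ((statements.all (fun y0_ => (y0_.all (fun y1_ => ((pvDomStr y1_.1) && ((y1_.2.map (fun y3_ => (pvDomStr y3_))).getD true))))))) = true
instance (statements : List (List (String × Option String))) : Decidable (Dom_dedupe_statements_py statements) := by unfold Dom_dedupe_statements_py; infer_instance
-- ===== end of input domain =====

-- ===== PORT A =====
-- B groups statements by type and takes max(group, key=non-null count) per group,
-- instead of A's running best per type; return values only (neither side mutates its input).
-- helper shared by both Pythons: sum(1 for v in s.values() if v is not None)
def pvNonNull (s : PySem.Dict String (Option String)) : Nat :=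
  s.values.countP (fun v => v.isSome)

def dedupe_statements_py (statements : List (List (String × Option String))) : List (List (String × Option String)) :=
  let by_type : PySem.Dict (Option String) (PySem.Dict String (Option String)) :=
    statements.foldl (fun by_type stmtL =>
      let stmt := PySem.Dict.ofList stmtL
      let type_id := stmt.getD "statement_type_id" none
      if by_type.contains type_id = false then
        by_type.insert type_id stmt
      else
        let existing := by_type.getD type_id (PySem.Dict.mk [])
        let existing_count := pvNonNull existing
        let new_count := pvNonNull stmt
        if new_count > existing_count then by_type.insert type_id stmt else by_type)
      PySem.Dict.empty
  by_type.values.map (fun d => d.items)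

-- ===== PORT B =====
def dedupe_statements_py_alt (statements : List (List (String × Option String))) : List (List (String × Option String)) :=
  let buckets : PySem.Dict (Option String) (List (PySem.Dict String (Option String))) :=
    statements.foldl (fun buckets stmtL =>
      let stmt := PySem.Dict.ofList stmtL
      buckets.modify (stmt.getD "statement_type_id" none) [] (fun g => g ++ [stmt]))
      PySem.Dict.empty
  buckets.values.map (fun group =>
    ((PySem.List.max? group pvNonNull).getD (PySem.Dict.mk [])).items)

-- ===== PRECONDITION & SPEC =====
def Spec_dedupe_statements_py (statements : List (List (String × Option String))) (out : List (List (String × Option String))) : Prop := out = dedupe_statements_py_alt statements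
instance (statements : List (List (String × Option String))) (out : List (List (String × Option String))) : Decidable (Spec_dedupe_statements_py statements out) := by unfold Spec_dedupe_statements_py; infer_instance

-- ===== CLAIM (what is proved, stated in full; the proofs are below) =====
def Claim_equal_dedupe_statements_py : Prop := ∀ (statements : List (List (String × Option String))), Dom_dedupe_statements_py statements → Spec_dedupe_statements_py statements (dedupe_statements_py statements)

-- ===== LEMMAS AND PROOFS =====

-- proof-only abbreviations: the two loop bodies, the per-group selection, and the
-- simulation map sending B's bucket dict to A's running-best dict
def pvStepA (by_type : PySem.Dict (Option String) (PySem.Dict String (Option String)))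
    (stmtL : List (String × Option String)) : PySem.Dict (Option String) (PySem.Dict String (Option String)) :=
  let stmt := PySem.Dict.ofList stmtL
  let type_id := stmt.getD "statement_type_id" none
  if by_type.contains type_id = false then
    by_type.insert type_id stmt
  else
    let existing := by_type.getD type_id (PySem.Dict.mk [])
    if pvNonNull stmt > pvNonNull existing then by_type.insert type_id stmt else by_type

def pvStepB (buckets : PySem.Dict (Option String) (List (PySem.Dict String (Option String))))
    (stmtL : List (String × Option String)) : PySem.Dict (Option String) (List (PySem.Dict String (Option String))) :=
  let stmt := PySem.Dict.ofList stmtL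
  buckets.modify (stmt.getD "statement_type_id" none) [] (fun g => g ++ [stmt])

def pvBest (g : List (PySem.Dict String (Option String))) : PySem.Dict String (Option String) :=
  (PySem.List.max? g pvNonNull).getD (PySem.Dict.mk [])

def pvMap (b : PySem.Dict (Option String) (List (PySem.Dict String (Option String)))) :
    PySem.Dict (Option String) (PySem.Dict String (Option String)) :=
  PySem.Dict.mk (b.items.map (fun p => (p.1, pvBest p.2)))

lemma pv_portA_eq (statements : List (List (String × Option String))) :
    dedupe_statements_py statements
      = (statements.foldl pvStepA PySem.Dict.empty).values.map (fun d => d.items) := rfl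

lemma pv_portB_eq (statements : List (List (String × Option String))) :
    dedupe_statements_py_alt statements
      = (statements.foldl pvStepB PySem.Dict.empty).values.map (fun g => (pvBest g).items) := rfl

lemma pv_keys_pvMap (b : PySem.Dict (Option String) (List (PySem.Dict String (Option String)))) :
    (pvMap b).keys = b.keys := by
  simp [pvMap, PySem.Dict.keys, List.map_map, Function.comp]

lemma pv_contains_pvMap (b : PySem.Dict (Option String) (List (PySem.Dict String (Option String))))
    (k : Option String) : (pvMap b).contains k = b.contains k := by
  rw [PySem.Dict.contains_eq_decide_mem_keys, PySem.Dict.contains_eq_decide_mem_keys, pv_keys_pvMap]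

lemma pv_best_singleton (s : PySem.Dict String (Option String)) : pvBest [s] = s := rfl

lemma pv_best_append (g : List (PySem.Dict String (Option String))) (hg : g ≠ [])
    (s : PySem.Dict String (Option String)) :
    pvBest (g ++ [s]) = if pvNonNull (pvBest g) < pvNonNull s then s else pvBest g := by
  obtain ⟨m, hm⟩ : ∃ m, PySem.List.max? g pvNonNull = some m := by
    cases h : PySem.List.max? g pvNonNull with
    | none => exact absurd ((PySem.List.max?_eq_none_iff g pvNonNull).mp h) hg
    | some m => exact ⟨m, rfl⟩
  unfold pvBest
  rw [hm]
  have hm' := hm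
  simp only [PySem.List.max?] at hm'
  simp only [PySem.List.max?, List.foldl_append, List.foldl_cons, List.foldl_nil, hm']
  by_cases h : pvNonNull m < pvNonNull s <;> simp [h]

lemma pv_unique_of_nodup (b : PySem.Dict (Option String) (List (PySem.Dict String (Option String))))
    (hnd : b.keys.Nodup) {t : Option String} {g : List (PySem.Dict String (Option String))}
    (hg : (t, g) ∈ b.items) {p : (Option String) × List (PySem.Dict String (Option String))}
    (hp : p ∈ b.items) (hpt : p.1 = t) : p = (t, g) := by
  have h1 := (PySem.Dict.get?_eq_some_iff_mem_items b t g hnd).mpr hg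
  have h2 := (PySem.Dict.get?_eq_some_iff_mem_items b t p.2 hnd).mpr (show (t, p.2) ∈ b.items by
    rw [← hpt]; exact hp)
  have : p.2 = g := by rw [h1] at h2; exact (Option.some.inj h2.symm)
  calc p = (p.1, p.2) := rfl
    _ = (t, g) := by rw [hpt, this]

-- one loop step: A's dict stays the image of B's buckets under pvMap
lemma pv_step (b : PySem.Dict (Option String) (List (PySem.Dict String (Option String))))
    (hnd : b.keys.Nodup) (hne : ∀ p ∈ b.items, p.2 ≠ [])
    (stmtL : List (String × Option String)) :
    pvStepA (pvMap b) stmtL = pvMap (pvStepB b stmtL) := by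
  set s := PySem.Dict.ofList stmtL with hs
  set t := s.getD "statement_type_id" none with ht
  have hmod : pvStepB b stmtL = b.insert t (b.getD t [] ++ [s]) := rfl
  by_cases hc : b.contains t = true
  · -- key already present: B appends to the bucket, A compares counts
    obtain ⟨p, hpmem, hpt⟩ : ∃ p ∈ b.items, p.1 = t := by
      have := (PySem.Dict.contains_iff_mem_keys b t).mp hc
      simpa [PySem.Dict.keys] using this
    obtain ⟨g, hgmem⟩ : ∃ g, (t, g) ∈ b.items := ⟨p.2, by rw [← hpt]; exact hpmem⟩
    have hgne : g ≠ [] := hne _ hgmem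
    have hgetb : b.getD t [] = g := PySem.Dict.getD_of_mem_items b hgmem hnd []
    have hndm : (pvMap b).keys.Nodup := by rw [pv_keys_pvMap]; exact hnd
    have hgeta : (pvMap b).getD t (PySem.Dict.mk []) = pvBest g := by
      refine PySem.Dict.getD_of_mem_items (pvMap b) ?_ hndm _
      exact List.mem_map.mpr ⟨(t, g), hgmem, rfl⟩
    have hcm : (pvMap b).contains t = true := by rw [pv_contains_pvMap]; exact hc
    have hAit := PySem.Dict.items_insert_of_contains (d := pvMap b) (v := s) hcm
    have hBit := PySem.Dict.items_insert_of_contains (d := b) (v := b.getD t [] ++ [s]) hc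
    by_cases hlt : pvNonNull s > pvNonNull (pvBest g)
    · -- new statement wins in A; it is the max of the extended bucket in B
      have hbest : pvBest (g ++ [s]) = s := by
        rw [pv_best_append g hgne s, if_pos hlt]
      have : pvStepA (pvMap b) stmtL = (pvMap b).insert t s := by
        simp only [pvStepA, ← hs, ← ht, hcm, hgeta]
        simp [hlt]
      rw [this, hmod]
      apply PySem.Dict.ext
      rw [hAit]
      show _ = ((b.insert t (b.getD t [] ++ [s])).items.map (fun p => (p.1, pvBest p.2)))
      rw [hBit]
      show (pvMap b).items.map _ = _
      simp only [pvMap, List.map_map]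
      refine List.map_congr_left (fun q hq => ?_)
      by_cases hqt : q.1 = t
      · simp [Function.comp, hqt, hgetb, hbest]
      · simp [Function.comp, hqt]
    · -- existing statement stays in A; it is still the max of the extended bucket in B
      have hbest : pvBest (g ++ [s]) = pvBest g := by
        rw [pv_best_append g hgne s, if_neg hlt]
      have : pvStepA (pvMap b) stmtL = pvMap b := by
        simp only [pvStepA, ← hs, ← ht, hcm, hgeta]
        simp [hlt]
      rw [this, hmod]
      apply PySem.Dict.ext
      show (pvMap b).items = ((b.insert t (b.getD t [] ++ [s])).items.map (fun p => (p.1, pvBest p.2)))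
      rw [hBit]
      show b.items.map _ = _
      simp only [List.map_map]
      refine List.map_congr_left (fun q hq => ?_)
      by_cases hqt : q.1 = t
      · have hq' : q = (t, g) := pv_unique_of_nodup b hnd hgmem hq hqt
        simp [Function.comp, hq', hgetb, hbest]
      · simp [Function.comp, hqt]
  · -- fresh key: both sides append a new entry
    have hc' : b.contains t = false := by simpa using hc
    have hcm : (pvMap b).contains t = false := by rw [pv_contains_pvMap]; exact hc'
    have hA : pvStepA (pvMap b) stmtL = (pvMap b).insert t s := by
      simp only [pvStepA, ← hs, ← ht, hcm]
      simp
    have hgetb : b.getD t [] = [] := PySem.Dict.getD_of_not_contains b [] hc'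
    rw [hA, hmod, hgetb]
    apply PySem.Dict.ext
    rw [PySem.Dict.items_insert_of_not_contains (pvMap b) s hcm,
        show ((pvMap (b.insert t ([] ++ [s]))).items
          = (b.insert t ([] ++ [s])).items.map (fun p => (p.1, pvBest p.2))) from rfl,
        PySem.Dict.items_insert_of_not_contains b ([] ++ [s]) hc']
    simp [pvMap, pv_best_singleton]

lemma pv_nodup_step (b : PySem.Dict (Option String) (List (PySem.Dict String (Option String))))
    (hnd : b.keys.Nodup) (stmtL : List (String × Option String)) :
    (pvStepB b stmtL).keys.Nodup := PySem.Dict.nodup_keys_insert _ _ _ hnd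

lemma pv_ne_step (b : PySem.Dict (Option String) (List (PySem.Dict String (Option String))))
    (hne : ∀ p ∈ b.items, p.2 ≠ []) (stmtL : List (String × Option String)) :
    ∀ p ∈ (pvStepB b stmtL).items, p.2 ≠ [] := by
  intro p hp
  rcases (PySem.Dict.mem_items_insert _ _ _ p).mp hp with h | ⟨h, _⟩
  · subst h; simp
  · exact hne _ h

lemma pv_fold (statements : List (List (String × Option String))) :
    ∀ (b : PySem.Dict (Option String) (List (PySem.Dict String (Option String)))),
      b.keys.Nodup → (∀ p ∈ b.items, p.2 ≠ []) →
      statements.foldl pvStepA (pvMap b) = pvMap (statements.foldl pvStepB b) := by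
  induction statements with
  | nil => intro b _ _; rfl
  | cons stmtL rest ih =>
    intro b hnd hne
    simp only [List.foldl_cons]
    rw [pv_step b hnd hne stmtL]
    exact ih _ (pv_nodup_step b hnd stmtL) (pv_ne_step b hne stmtL)

-- ===== VERDICT (by name: the statement is the Claim_ definition above) =====
theorem dedupe_statements_py_spec : Claim_equal_dedupe_statements_py := by
  intro statements _
  unfold Spec_dedupe_statements_py
  rw [pv_portA_eq, pv_portB_eq,
      show (PySem.Dict.empty : PySem.Dict (Option String) (PySem.Dict String (Option String)))
        = pvMap PySem.Dict.empty from rfl,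
      pv_fold statements PySem.Dict.empty (by simp [PySem.Dict.keys, PySem.Dict.empty]) (by simp [PySem.Dict.empty])]
  simp [pvMap, PySem.Dict.values, List.map_map, Function.comp]
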